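-- pv_equiv track=rewrite | github.com/collinsakenga/codewars_solutions | 5 kyu/1s 0s and wildcards.py | possibilities
-- ===== SOURCE A (Python) =====
-- def possibilities(param):
--     check=[]
--     for i,j in enumerate(param):
--         if j=="?":
--             check.append(i)
--     temp=list(param)
--     result=[]
--     res=generate(param.count("?"),"",[])
--     for i in res:
--         for j,k in enumerate(i):
--             temp[check[j]]=k
--         result.append("".join(temp))
--     return result
--
-- def generate(len, solution, res):
--     if len==0:
--         res.append(solution)
--     else:
--         generate(len-1, solution+"0",res)
--         generate(len-1, solution+"1",res)
--     return res
-- ===== SOURCE B (Python) =====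
-- def possibilities(param):
--     result = ['']
--     for ch in reversed(param):
--         if ch == '?':
--             result = ['0' + r for r in result] + ['1' + r for r in result]
--         else:
--             result = [ch + r for r in result]
--     return result
-- ===== Notes on version B (the rewrite author's own statement) =====
-- stated objective: simpler
-- what changed: A precomputes the list of '?' indices, generates every binary string of that length with a recursive accumulator helper, and repeatedly overwrites a shared character buffer; B is a single non-recursive right-to-left pass over the string that builds the result list directly, prepending each character (the '0' variants before the '1' variants at a '?').
import Mathlib
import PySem

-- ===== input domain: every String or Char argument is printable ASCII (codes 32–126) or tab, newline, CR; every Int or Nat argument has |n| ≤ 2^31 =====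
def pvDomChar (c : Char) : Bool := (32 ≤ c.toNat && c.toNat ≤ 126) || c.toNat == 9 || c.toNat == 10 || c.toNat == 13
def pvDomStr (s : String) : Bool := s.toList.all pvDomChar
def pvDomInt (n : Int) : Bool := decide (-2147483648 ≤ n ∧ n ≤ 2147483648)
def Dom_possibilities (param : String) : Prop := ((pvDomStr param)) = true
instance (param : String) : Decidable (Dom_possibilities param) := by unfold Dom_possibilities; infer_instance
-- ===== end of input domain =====

-- B replaces A's precompute-the-'?'-indices / enumerate-all-fills / overwrite-a-shared-buffer machinery
-- by one structural recursion on the string (fill the first character, recurse on the rest); objective: simpler.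

-- ===== PORT A =====
-- generate(len, solution, res): res is mutated and returned; the '0' branch runs first, so its
-- appends precede the '1' branch's.
def pvGenerate : Nat → List Char → List (List Char) → List (List Char)
  | 0, sol, res => res ++ [sol]
  | n+1, sol, res => pvGenerate n (sol ++ ['1']) (pvGenerate n (sol ++ ['0']) res)

-- possibilities(param); strings are ported on .toList per the PySem convention.
-- check[j] and temp[check[j]] = k are always in range (len(i) = param.count('?') = len(check)),
-- so the total forms pyGetD / pySetD are exact here; "".join(temp) joins 1-char strings.
def possibilities (param : String) : List String :=
  let cs := param.toList
  let check : List Int := (PySem.List.enumerate cs).foldl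
      (fun acc ij => if ij.2 = '?' then acc ++ [ij.1] else acc) []
  let res := pvGenerate (PySem.Str.count param "?") [] []
  (res.foldl (fun (st : List Char × List String) i =>
      let t := (PySem.List.enumerate i).foldl
        (fun t jk => PySem.List.pySetD t (PySem.List.pyGetD check jk.1 0) jk.2) st.1
      (t, st.2 ++ [PySem.Str.join "" (t.map (fun c => String.ofList [c]))])) (cs, [])).2

-- ===== PORT B =====
-- Source B's loop over reversed(param) with the accumulator result, ported on .toList: a foldl over
-- the reversed character list, prepending the head ('0'-branch before '1'-branch when it is '?').
def possibilities_alt (param : String) : List String :=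
  (param.toList.reverse.foldl (fun result ch =>
      if ch = '?' then result.map (fun r => '0' :: r) ++ result.map (fun r => '1' :: r)
      else result.map (fun r => ch :: r)) [[]]).map String.ofList

-- ===== PRECONDITION & SPEC =====
def Spec_possibilities (param : String) (out : List String) : Prop := out = possibilities_alt param
instance (param : String) (out : List String) : Decidable (Spec_possibilities param out) := by unfold Spec_possibilities; infer_instance

-- ===== CLAIM (what is proved, stated in full; the proofs are below) =====
def Claim_equal_possibilities : Prop := ∀ (param : String), Dom_possibilities param → Spec_possibilities param (possibilities param)

-- ===== LEMMAS AND PROOFS =====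

-- all binary words of length n, '0'-branch first, leftmost position varying slowest
def pvAllBin : Nat → List (List Char)
  | 0 => [[]]
  | n+1 => (pvAllBin n).map (fun b => '0' :: b) ++ (pvAllBin n).map (fun b => '1' :: b)

-- the template cs with its '?' positions replaced by the bits bs, left to right
def pvFillWith : List Char → List Char → List Char
  | [], _ => []
  | c :: cs, bs => if c = '?' then bs.headD '?' :: pvFillWith cs bs.tail else c :: pvFillWith cs bs

-- t has the same length as cs and equals cs at every non-'?' position of cs
def pvAgrees : List Char → List Char → Prop
  | [], [] => True
  | c :: cs, d :: ts => (c ≠ '?' → d = c) ∧ pvAgrees cs ts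
  | _, _ => False

-- the indices (as Python ints) of the '?' characters of cs, offset by s
def pvQIdx : List Char → Nat → List Int
  | [], _ => []
  | c :: cs, s => if c = '?' then ((s : Int)) :: pvQIdx cs (s+1) else pvQIdx cs (s+1)

theorem pv_go_single (fuel : Nat) : ∀ (l : List Char) (acc : Nat), l.length ≤ fuel →
    PySem.Chars.count.go ['?'] fuel l acc = acc + l.count '?' := by
  induction fuel with
  | zero => intro l acc h; cases l with
    | nil => simp [PySem.Chars.count.go]
    | cons c t => simp at h
  | succ f ih =>
    intro l acc h
    cases l with
    | nil => simp [PySem.Chars.count.go]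
    | cons c t =>
      simp at h
      by_cases hc : c = '?'
      · subst hc
        rw [show PySem.Chars.count.go ['?'] (f+1) ('?' :: t) acc
              = PySem.Chars.count.go ['?'] f t (acc+1) by
            simp [PySem.Chars.count.go, List.isPrefixOf]]
        rw [ih t (acc+1) h]
        simp
        omega
      · rw [show PySem.Chars.count.go ['?'] (f+1) (c :: t) acc
              = PySem.Chars.count.go ['?'] f t acc by
            simp [PySem.Chars.count.go, List.isPrefixOf, Ne.symm hc]]
        rw [ih t acc h]
        simp [hc]

theorem pv_count_single (cs : List Char) : PySem.Chars.count cs ['?'] = cs.count '?' := by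
  have := pv_go_single cs.length cs 0 le_rfl
  simpa [PySem.Chars.count] using this

theorem pv_gen_eq (n : Nat) : ∀ (sol : List Char) (res : List (List Char)),
    pvGenerate n sol res = res ++ (pvAllBin n).map (fun b => sol ++ b) := by
  induction n with
  | zero => intro sol res; simp [pvGenerate, pvAllBin]
  | succ n ih =>
    intro sol res
    simp [pvGenerate, pvAllBin, ih, List.map_map, Function.comp_def]

theorem pv_fill_eq (cs : List Char) :
    cs.reverse.foldl (fun result ch =>
        if ch = '?' then result.map (fun r => '0' :: r) ++ result.map (fun r => '1' :: r)
        else result.map (fun r => ch :: r)) [[]]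
      = (pvAllBin (cs.count '?')).map (pvFillWith cs) := by
  rw [List.foldl_reverse]
  induction cs with
  | nil => simp [pvAllBin, pvFillWith]
  | cons c cs ih =>
    by_cases hc : c = '?'
    · subst hc
      simp [List.foldr_cons, ih, pvAllBin, List.map_map, Function.comp_def, pvFillWith]
    · simp [List.foldr_cons, ih, hc, List.map_map, Function.comp_def, pvFillWith]

theorem pv_check_eq (cs : List Char) : ∀ (s : Nat) (acc : List Int),
    (PySem.List.enumerate cs (s : Int)).foldl
      (fun acc ij => if ij.2 = '?' then acc ++ [ij.1] else acc) acc
    = acc ++ pvQIdx cs s := by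
  induction cs with
  | nil => intro s acc; simp [PySem.List.enumerate_nil, pvQIdx]
  | cons c cs ih =>
    intro s acc
    rw [PySem.List.enumerate_cons]
    have hcast : (s : Int) + 1 = ((s + 1 : Nat) : Int) := by push_cast; ring
    by_cases hc : c = '?'
    · simp only [List.foldl_cons, hc, hcast, ih]
      simp [pvQIdx]
    · simp only [List.foldl_cons, if_neg hc, hcast, ih]
      simp [pvQIdx, hc]

theorem pv_qidx_len (cs : List Char) : ∀ s, (pvQIdx cs s).length = cs.count '?' := by
  induction cs with
  | nil => intro s; simp [pvQIdx]
  | cons c cs ih =>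
    intro s
    by_cases hc : c = '?' <;> simp [pvQIdx, hc, ih]

theorem pv_allBin_len (n : Nat) : ∀ b ∈ pvAllBin n, b.length = n := by
  induction n with
  | zero => intro b hb; simp [pvAllBin] at hb; simp [hb]
  | succ n ih =>
    intro b hb
    simp [pvAllBin] at hb
    rcases hb with ⟨a, ha, rfl⟩ | ⟨a, ha, rfl⟩ <;> simp [ih a ha]

theorem pv_agrees_refl (cs : List Char) : pvAgrees cs cs := by
  induction cs with
  | nil => trivial
  | cons c cs ih => exact ⟨fun _ => rfl, ih⟩

theorem pv_agrees_fillWith (cs : List Char) : ∀ bs, pvAgrees cs (pvFillWith cs bs) := by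
  induction cs with
  | nil => intro bs; trivial
  | cons c cs ih =>
    intro bs
    by_cases hc : c = '?'
    · subst hc; simp only [pvFillWith, reduceIte]
      exact ⟨fun h => absurd rfl h, ih bs.tail⟩
    · simp only [pvFillWith, if_neg hc]
      exact ⟨fun _ => rfl, ih bs⟩

-- the enumerate-and-index write loop is the fold of plain writes over (check positions) zip (bits)
theorem pv_write_zip (ck : List Int) (i : List Char) : ∀ (s : Nat) (t : List Char),
    s + i.length ≤ ck.length →
    (PySem.List.enumerate i (s : Int)).foldl
      (fun t jk => PySem.List.pySetD t (PySem.List.pyGetD ck jk.1 0) jk.2) t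
    = ((ck.drop s).zip i).foldl (fun t pk => PySem.List.pySetD t pk.1 pk.2) t := by
  induction i with
  | nil => intro s t _; simp [PySem.List.enumerate_nil]
  | cons x i ih =>
    intro s t hs
    simp at hs
    have hslt : s < ck.length := by omega
    rw [PySem.List.enumerate_cons]
    have hcast : (s : Int) + 1 = ((s + 1 : Nat) : Int) := by push_cast; ring
    rw [List.foldl_cons, hcast, ih (s+1) _ (by omega)]
    rw [show List.drop s ck = ck[s] :: List.drop (s+1) ck from List.drop_eq_getElem_cons hslt]
    rw [List.zip_cons_cons, List.foldl_cons]
    congr 1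
    simp [PySem.List.pyGetD_natCast, List.getD_eq_getElem?_getD, List.getElem?_eq_getElem hslt]

-- writing bits i at the '?' positions of cs into pre ++ t produces pre ++ (cs filled with i)
theorem pv_setAll (cs : List Char) : ∀ (t i pre : List Char),
    pvAgrees cs t → i.length = cs.count '?' →
    ((pvQIdx cs pre.length).zip i).foldl
      (fun t pk => PySem.List.pySetD t pk.1 pk.2) (pre ++ t)
    = pre ++ pvFillWith cs i := by
  induction cs with
  | nil =>
    intro t i pre ha _
    cases t with
    | nil => simp [pvQIdx, pvFillWith]
    | cons d ts => exact absurd ha (by simp [pvAgrees])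
  | cons c cs ih =>
    intro t i pre ha hlen
    cases t with
    | nil => exact absurd ha (by simp [pvAgrees])
    | cons d ts =>
      obtain ⟨hd, hts⟩ := ha
      by_cases hc : c = '?'
      · subst hc
        cases i with
        | nil => simp at hlen
        | cons k ks =>
          rw [show pvQIdx ('?' :: cs) pre.length
                = ((pre.length : Int)) :: pvQIdx cs (pre.length + 1) by simp [pvQIdx]]
          rw [List.zip_cons_cons, List.foldl_cons]
          have hset : PySem.List.pySetD (pre ++ d :: ts) ((pre.length : Int)) k
              = (pre ++ [k]) ++ ts := by
            rw [PySem.List.pySetD_natCast]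
            rw [List.set_append]
            simp
          rw [hset]
          have hlenpre : pre.length + 1 = (pre ++ [k]).length := by simp
          rw [hlenpre, ih ts ks (pre ++ [k]) hts (by simp at hlen; omega)]
          simp [pvFillWith]
      · rw [show pvQIdx (c :: cs) pre.length = pvQIdx cs (pre.length + 1) by simp [pvQIdx, hc]]
        have hd' : d = c := hd hc
        subst hd'
        have hre : pre ++ d :: ts = (pre ++ [d]) ++ ts := by simp
        have hlenpre : pre.length + 1 = (pre ++ [d]).length := by simp
        rw [hre, hlenpre, ih ts i (pre ++ [d]) hts (by simpa [hc] using hlen)]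
        simp [pvFillWith, hc]

theorem pv_join_singletons (t : List Char) :
    PySem.Str.join "" (t.map (fun c => String.ofList [c])) = String.ofList t := by
  apply String.toList_injective
  rw [PySem.Str.toList_join]
  simp [List.map_map, Function.comp_def]

-- the outer loop: the result list collects cs filled with each bit vector of res, in order
theorem pv_outer (cs : List Char) (res : List (List Char)) :
    ∀ (t : List Char) (acc : List String),
    pvAgrees cs t → (∀ i ∈ res, i.length = cs.count '?') →
    (res.foldl (fun (st : List Char × List String) i =>
        ((PySem.List.enumerate i).foldl
            (fun t jk => PySem.List.pySetD t (PySem.List.pyGetD (pvQIdx cs 0) jk.1 0) jk.2) st.1,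
         st.2 ++ [PySem.Str.join "" (((PySem.List.enumerate i).foldl
            (fun t jk => PySem.List.pySetD t (PySem.List.pyGetD (pvQIdx cs 0) jk.1 0) jk.2) st.1).map
              (fun c => String.ofList [c]))])) (t, acc)).2
    = acc ++ res.map (fun i => String.ofList (pvFillWith cs i)) := by
  induction res with
  | nil => intro t acc _ _; simp
  | cons i res ih =>
    intro t acc ha hlen
    have hi : i.length = cs.count '?' := hlen i (by simp)
    have hw : (PySem.List.enumerate i).foldl
        (fun t jk => PySem.List.pySetD t (PySem.List.pyGetD (pvQIdx cs 0) jk.1 0) jk.2) t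
        = pvFillWith cs i := by
      have hz := pv_write_zip (pvQIdx cs 0) i 0 t (by rw [pv_qidx_len]; omega)
      norm_num at hz
      rw [hz]
      have hs := pv_setAll cs t i [] ha hi
      simpa using hs
    simp only [List.foldl_cons, hw]
    rw [ih (pvFillWith cs i) _ (pv_agrees_fillWith cs i) (fun j hj => hlen j (by simp [hj]))]
    simp [pv_join_singletons]

-- ===== VERDICT (by name: the statement is the Claim_ definition above) =====
theorem possibilities_spec : Claim_equal_possibilities := by
  intro param _
  unfold Spec_possibilities possibilities possibilities_alt
  set cs := param.toList with hcs
  have hcount : PySem.Str.count param "?" = cs.count '?' := by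
    rw [PySem.Str.count_eq]
    exact pv_count_single cs
  have hcheck : (PySem.List.enumerate cs).foldl
      (fun acc ij => if ij.2 = '?' then acc ++ [ij.1] else acc) [] = pvQIdx cs 0 := by
    have := pv_check_eq cs 0 []
    simpa using this
  have hres : pvGenerate (cs.count '?') [] [] = pvAllBin (cs.count '?') := by
    rw [pv_gen_eq]
    simp
  simp only [hcheck, hcount, hres]
  rw [pv_outer cs (pvAllBin (cs.count '?')) cs []
        (pv_agrees_refl cs) (fun i hi => pv_allBin_len _ i hi)]
  rw [pv_fill_eq cs]
  simp [List.map_map, Function.comp_def]
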